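-- pv_equiv track=rewrite | github.com/Sivaraj-8354/Multi-Rule-Steganography-detection-tool | app.py | encode_txt_data
-- ===== SOURCE A (Python) =====
-- COVER_TEXT = """Lorem ipsum dolor sit amet, consectetur adipiscing elit. Sed do eiusmod tempor incididunt ut labore et dolore magna aliqua. Ut enim ad minim veniam, quis nostrud exercitation ullamco laboris nisi ut aliquip ex ea commodo consequat. Duis aute irure dolor in reprehenderit in voluptate velit esse cillum dolore eu fugiat nulla pariatur. Excepteur sint occaecat cupidatat non proident, sunt in culpa qui officia deserunt mollit anim id est laborum.
-- Curabitur pretium tincidunt lacus. Nulla gravida orci a odio. Nullam varius, turpis et commodo pharetra, est eros bibendum elit, nec luctus magna felis sollicitudin mauris. Integer in mauris eu nibh euismod gravida. Duis ac tellus et risus vulputate vehicula. Donec lobortis risus a elit. Etiam tempor. Ut ullamcorper, ligula eu tempor congue, eros est euismod turpis, id tincidunt sapien risus a quam. Maecenas fermentum consequat mi. Donec fermentum. Pellentesque malesuada nulla a mi. Duis sapien sem, aliquet nec, commodo eget, consequat quis, neque.""".split()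
--
-- def encode_txt_data(text):
--     l = len(text)
--     i = 0
--     add = ''
--     while i < l:
--         t = ord(text[i])
--         if 32 <= t <= 64:
--             t1 = t + 48
--             t2 = t1 ^ 170
--             res = bin(t2)[2:].zfill(8)
--             add += "0011" + res
--         else:
--             t1 = t - 48
--             t2 = t1 ^ 170
--             res = bin(t2)[2:].zfill(8)
--             add += "0110" + res
--         i += 1
--
--     res1 = add + "111111111111"
--     HM_SK = ""
--     ZWC = {"00": '\u200C', "01": '\u202C', "11": '\u202D', "10": '\u200E'}
--
--     result = []
--     i = 0
--     while i < len(res1):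
--         s = COVER_TEXT[int(i / 12)]
--         j = 0
--         x = ""
--         HM_SK = ""
--         while j < 12 and (i + j + 1) < len(res1):
--             x = res1[j + i] + res1[i + j + 1]
--             HM_SK += ZWC[x]
--             j += 2
--         s1 = s + HM_SK
--         result.append(s1)
--         i += 12
--
--     t = int(len(res1) / 12)
--     while t < len(COVER_TEXT):
--         result.append(COVER_TEXT[t])
--         t += 1
--
--     return ' '.join(result)
-- ===== SOURCE B (Python) =====
-- COVER_TEXT = """Lorem ipsum dolor sit amet, consectetur adipiscing elit. Sed do eiusmod tempor incididunt ut labore et dolore magna aliqua. Ut enim ad minim veniam, quis nostrud exercitation ullamco laboris nisi ut aliquip ex ea commodo consequat. Duis aute irure dolor in reprehenderit in voluptate velit esse cillum dolore eu fugiat nulla pariatur. Excepteur sint occaecat cupidatat non proident, sunt in culpa qui officia deserunt mollit anim id est laborum.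
-- Curabitur pretium tincidunt lacus. Nulla gravida orci a odio. Nullam varius, turpis et commodo pharetra, est eros bibendum elit, nec luctus magna felis sollicitudin mauris. Integer in mauris eu nibh euismod gravida. Duis ac tellus et risus vulputate vehicula. Donec lobortis risus a elit. Etiam tempor. Ut ullamcorper, ligula eu tempor congue, eros est euismod turpis, id tincidunt sapien risus a quam. Maecenas fermentum consequat mi. Donec fermentum. Pellentesque malesuada nulla a mi. Duis sapien sem, aliquet nec, commodo eget, consequat quis, neque.""".split()
--
--
-- def encode_txt_data(text):
--     # One fused pass: per character, build the 12-bit code and its 6 zero-width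
--     # chars directly (back-to-front via divmod), no global bit-string buffer.
--     zwc = {0: '\u200C', 1: '\u202C', 2: '\u200E', 3: '\u202D'}
--     words = []
--     for k, ch in enumerate(text):
--         t = ord(ch)
--         if 32 <= t <= 64:
--             code = 3 * 256 + ((t + 48) ^ 170)
--         else:
--             code = 6 * 256 + ((t - 48) ^ 170)
--         suffix = ''
--         for _ in range(6):
--             code, p = divmod(code, 4)
--             suffix = zwc[p] + suffix
--         words.append(COVER_TEXT[k] + suffix)
--     words.append(COVER_TEXT[len(text)] + zwc[3] * 6)
--     words.extend(COVER_TEXT[len(text) + 1:])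
--     return ' '.join(words)
-- ===== Notes on version B (the rewrite author's own statement) =====
-- stated objective: simpler
-- what changed: B fuses A's two passes -- the global bit-string buffer plus the int(i/12) re-chunking double loop -- into one per-character loop that builds each cover word's 6-char zero-width suffix directly from the 12-bit code via divmod, then appends the terminator word and the remaining cover words.
import Mathlib
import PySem

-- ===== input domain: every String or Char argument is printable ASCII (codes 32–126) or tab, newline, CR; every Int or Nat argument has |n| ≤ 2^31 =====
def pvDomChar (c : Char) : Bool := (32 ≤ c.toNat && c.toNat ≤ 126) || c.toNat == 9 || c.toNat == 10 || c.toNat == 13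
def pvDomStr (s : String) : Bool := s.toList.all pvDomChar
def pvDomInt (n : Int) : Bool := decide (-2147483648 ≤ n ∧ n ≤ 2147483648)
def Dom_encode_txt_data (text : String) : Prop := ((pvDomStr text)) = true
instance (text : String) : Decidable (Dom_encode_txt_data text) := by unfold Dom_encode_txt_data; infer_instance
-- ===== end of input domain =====

-- B fuses A's two passes (global bit-string buffer + 12-bit re-chunking loop) into one
-- per-character loop computing each cover word's 6-char zero-width suffix directly (objective: simpler).

-- shared module constant COVER_TEXT (the split of the cover paragraph)
def coverText : List String := ["Lorem", "ipsum", "dolor", "sit", "amet,", "consectetur", "adipiscing", "elit.", "Sed", "do", "eiusmod", "tempor", "incididunt", "ut", "labore", "et", "dolore", "magna", "aliqua.", "Ut", "enim", "ad", "minim", "veniam,", "quis", "nostrud", "exercitation", "ullamco", "laboris", "nisi", "ut", "aliquip", "ex", "ea", "commodo", "consequat.", "Duis", "aute", "irure", "dolor", "in", "reprehenderit", "in", "voluptate", "velit", "esse", "cillum", "dolore", "eu", "fugiat", "nulla", "pariatur.", "Excepteur", "sint", "occaecat", "cupidatat", "non", "proident,", "sunt", "in", "culpa", "qui", "officia", "deserunt",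 "mollit", "anim", "id", "est", "laborum.", "Curabitur", "pretium", "tincidunt", "lacus.", "Nulla", "gravida", "orci", "a", "odio.", "Nullam", "varius,", "turpis", "et", "commodo", "pharetra,", "est", "eros", "bibendum", "elit,", "nec", "luctus", "magna", "felis", "sollicitudin", "mauris.", "Integer", "in", "mauris", "eu", "nibh", "euismod", "gravida.", "Duis", "ac", "tellus", "et", "risus", "vulputate", "vehicula.", "Donec", "lobortis", "risus", "a", "elit.", "Etiam", "tempor.", "Ut", "ullamcorper,", "ligula", "eu", "tempor", "congue,", "eros", "est", "euismod", "turpis,", "id", "tincidunt", "sapien", "risus", "a", "quam.", "Maecenas", "fermentum", "consequat", "mi.", "Donec", "fermentum.", "Pellentesque", "malesuada", "nulla", "a", "mi.", "Duis", "sapien", "sem,", "aliquet", "nec,", "commodo", "eget,", "consequat", "quis,", "neque."]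

-- ===== PORT A =====
-- bin(t2)[2:] is PySem.Int.toBinChars for t2 ≥ 0 (always the case inside Pre_); .zfill(8):
def zfill8 (cs : List Char) : List Char := List.replicate (8 - cs.length) '0' ++ cs

-- body of A's first while loop for one character (t = ord(text[i]))
def charBitsA (t : Int) : List Char :=
  if 32 ≤ t ∧ t ≤ 64 then
    "0011".toList ++ zfill8 (PySem.Int.toBinChars (PySem.Int.bxor (t + 48) 170))
  else
    "0110".toList ++ zfill8 (PySem.Int.toBinChars (PySem.Int.bxor (t - 48) 170))

-- ZWC = {"00": ZWNJ, "01": PDF(202C), "11": 202D, "10": LRM}; keys as List Char, KeyError → Pre_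
def zwcA : PySem.Dict (List Char) String :=
  PySem.Dict.ofList [(['0','0'], "\u200C"), (['0','1'], "\u202C"), (['1','1'], "\u202D"), (['1','0'], "\u200E")]

-- inner 'while j < 12 and (i + j + 1) < len(res1)' loop; list indices are in range under Pre_, getD defaults unused
def innerLoopA (res1 : List Char) (i j : Nat) (hmsk : String) : String :=
  if _h : j < 12 ∧ i + j + 1 < res1.length then
    innerLoopA res1 i (j + 2) (hmsk ++ zwcA.getD [res1.getD (j + i) ' ', res1.getD (i + j + 1) ' '] "")
  else hmsk
termination_by 12 - j
decreasing_by omega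

-- outer 'while i < len(res1)' loop (i steps by 12; int(i/12) = i / 12 for i ≥ 0)
def outerLoopA (res1 : List Char) (i : Nat) (result : List String) : List String :=
  if _h : i < res1.length then
    outerLoopA res1 (i + 12) (result ++ [coverText.getD (i / 12) "" ++ innerLoopA res1 i 0 ""])
  else result
termination_by res1.length - i
decreasing_by omega

-- final 'while t < len(COVER_TEXT)' loop
def tailLoopA (t : Nat) (result : List String) : List String :=
  if _h : t < coverText.length then tailLoopA (t + 1) (result ++ [coverText.getD t ""]) else result
termination_by coverText.length - t
decreasing_by omega

def encode_txt_data (text : String) : String :=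
  let add := text.toList.foldl (fun a c => a ++ charBitsA (c.toNat : Int)) []
  let res1 := add ++ "111111111111".toList
  let result := outerLoopA res1 0 []
  let result2 := tailLoopA (res1.length / 12) result
  PySem.Str.join " " result2

-- ===== PORT B =====
-- zwc = {0: ZWNJ, 1: 202C, 2: LRM, 3: 202D}
def zwcB : PySem.Dict Int String :=
  PySem.Dict.ofList [(0, "\u200C"), (1, "\u202C"), (2, "\u200E"), (3, "\u202D")]

-- the 12-bit code of one character
def altCode (t : Int) : Int :=
  if 32 ≤ t ∧ t ≤ 64 then 3 * 256 + PySem.Int.bxor (t + 48) 170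
  else 6 * 256 + PySem.Int.bxor (t - 48) 170

-- 'for _ in range(6): code, p = divmod(code, 4); suffix = zwc[p] + suffix'
def altSuffix (code : Int) (n : Nat) (suffix : String) : String :=
  match n with
  | 0 => suffix
  | m + 1 => altSuffix (PySem.Int.floordiv code 4) m (zwcB.getD (PySem.Int.mod code 4) "" ++ suffix)

-- 's * 6' for a one-char string s
def strMul (s : String) (n : Nat) : String :=
  match n with
  | 0 => ""
  | m + 1 => s ++ strMul s m

-- 'for k, ch in enumerate(text)' with the words accumulator (k = Python's enumerate counter, nonneg)
def altLoopB (k : Nat) (cs : List Char) (words : List String) : List String :=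
  match cs with
  | [] => words
  | c :: rest => altLoopB (k + 1) rest (words ++ [coverText.getD k "" ++ altSuffix (altCode (c.toNat : Int)) 6 ""])

def encode_txt_data_alt (text : String) : String :=
  let cs := text.toList
  let words := altLoopB 0 cs []
  let words := words ++ [coverText.getD cs.length "" ++ strMul (zwcB.getD 3 "") 6]
  let words := words ++ PySem.List.slice coverText (some ((cs.length + 1 : Nat) : Int)) none
  PySem.Str.join " " words

-- ===== PRECONDITION & SPEC =====
-- Pre_ excludes exactly the in-domain inputs on which A RAISES: a control character (code < 32,
-- i.e. tab/newline/CR inside Dom) makes bin() produce a negative binary string and the ZWC lookup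
-- raise KeyError, and a text needing more than the 152 cover words raises IndexError.
def Pre_encode_txt_data (text : String) : Prop :=
  (text.toList.all (fun c => 32 ≤ c.toNat) = true) ∧ text.toList.length + 1 ≤ 152
instance (text : String) : Decidable (Pre_encode_txt_data text) := by
  unfold Pre_encode_txt_data; infer_instance

def pvWitness_encode_txt_data : String := "Hi!"

def Spec_encode_txt_data (text : String) (out : String) : Prop := out = encode_txt_data_alt text
instance (text : String) (out : String) : Decidable (Spec_encode_txt_data text out) := by
  unfold Spec_encode_txt_data; infer_instance

-- ===== CLAIM (what is proved, stated in full; the proofs are below) =====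
def Claim_equal_encode_txt_data : Prop := ∀ (text : String), Dom_encode_txt_data text → Pre_encode_txt_data text → Spec_encode_txt_data text (encode_txt_data text)

-- ===== LEMMAS AND PROOFS =====

-- one ZWC character of A's inner loop, read at absolute positions a, b of res1
def zTerm (res1 : List Char) (a b : Nat) : String :=
  zwcA.getD [res1.getD a ' ', res1.getD b ' '] ""

-- the string A's inner loop produces from one 12-bit chunk b (pairs (0,1),(2,3),…,(10,11))
def chunkStr (b : List Char) : String :=
  "" ++ zTerm b 0 1 ++ zTerm b 2 3 ++ zTerm b 4 5 ++ zTerm b 6 7 ++ zTerm b 8 9 ++ zTerm b 10 11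

lemma innerLoopA_eq (res1 : List Char) (i : Nat) (h : i + 12 ≤ res1.length) :
    innerLoopA res1 i 0 "" =
      "" ++ zTerm res1 (0 + i) (1 + i) ++ zTerm res1 (2 + i) (3 + i) ++ zTerm res1 (4 + i) (5 + i)
         ++ zTerm res1 (6 + i) (7 + i) ++ zTerm res1 (8 + i) (9 + i) ++ zTerm res1 (10 + i) (11 + i) := by
  unfold innerLoopA
  rw [dif_pos (by omega : (0:Nat) < 12 ∧ i + 0 + 1 < res1.length)]
  unfold innerLoopA
  rw [dif_pos (by omega : (0+2:Nat) < 12 ∧ i + (0+2) + 1 < res1.length)]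
  unfold innerLoopA
  rw [dif_pos (by omega : (0+2+2:Nat) < 12 ∧ i + (0+2+2) + 1 < res1.length)]
  unfold innerLoopA
  rw [dif_pos (by omega : (0+2+2+2:Nat) < 12 ∧ i + (0+2+2+2) + 1 < res1.length)]
  unfold innerLoopA
  rw [dif_pos (by omega : (0+2+2+2+2:Nat) < 12 ∧ i + (0+2+2+2+2) + 1 < res1.length)]
  unfold innerLoopA
  rw [dif_pos (by omega : (0+2+2+2+2+2:Nat) < 12 ∧ i + (0+2+2+2+2+2) + 1 < res1.length)]
  unfold innerLoopA
  rw [dif_neg (by omega : ¬((0+2+2+2+2+2+2:Nat) < 12 ∧ i + (0+2+2+2+2+2+2) + 1 < res1.length))]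
  simp only [zTerm]
  ring_nf

lemma getD_shift {α : Type} (pre ys : List α) (d : α) (j : Nat) :
    (pre ++ ys).getD (j + pre.length) d = ys.getD j d := by
  rw [List.getD_append_right _ _ _ _ (Nat.le_add_left _ _), Nat.add_sub_cancel]

-- per-character fact, checked for every admissible code point
set_option maxRecDepth 8192 in
set_option maxHeartbeats 1000000 in
lemma perChar : ∀ t ∈ List.range 127, 32 ≤ t →
    ((charBitsA (t : Int)).length = 12 ∧
      chunkStr (charBitsA (t : Int)) = altSuffix (altCode (t : Int)) 6 "") := by
  decide

lemma zTerm_shift (pre ys : List Char) (a b : Nat) :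
    zTerm (pre ++ ys) (a + pre.length) (b + pre.length) = zTerm ys a b := by
  simp only [zTerm, getD_shift]

lemma zTerm_left (b rest : List Char) (a a' : Nat) (ha : a < b.length) (ha' : a' < b.length) :
    zTerm (b ++ rest) a a' = zTerm b a a' := by
  simp only [zTerm, List.getD_append _ _ _ _ ha, List.getD_append _ _ _ _ ha']

lemma bits_length : ∀ (cs : List Char), (∀ c ∈ cs, 32 ≤ c.toNat ∧ c.toNat ≤ 126) →
    (cs.flatMap (fun c => charBitsA (c.toNat : Int))).length = 12 * cs.length := by
  intro cs
  induction cs with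
  | nil => intro _; simp
  | cons c cs ih =>
    intro hg
    have hc := hg c (by simp)
    simp only [List.flatMap_cons, List.length_append, List.length_cons]
    rw [(perChar c.toNat (List.mem_range.mpr (by omega)) hc.1).1,
        ih (fun x hx => hg x (by simp [hx]))]
    ring

lemma outer_main : ∀ (cs : List Char), (∀ c ∈ cs, 32 ≤ c.toNat ∧ c.toNat ≤ 126) →
    ∀ (k : Nat) (pre : List Char) (acc : List String), pre.length = 12 * k →
    outerLoopA (pre ++ (cs.flatMap (fun c => charBitsA (c.toNat : Int)) ++ "111111111111".toList))
        (12 * k) acc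
      = altLoopB k cs acc ++ [coverText.getD (k + cs.length) "" ++ strMul (zwcB.getD 3 "") 6] := by
  intro cs
  induction cs with
  | nil =>
    intro _ k pre acc hpre
    simp only [List.flatMap_nil, List.nil_append]
    have hlen : (pre ++ "111111111111".toList).length = 12 * k + 12 := by
      simp [hpre]
    unfold outerLoopA
    rw [dif_pos (by rw [hlen]; omega)]
    unfold outerLoopA
    rw [dif_neg (by rw [hlen]; omega)]
    rw [innerLoopA_eq _ _ (by rw [hlen])]
    rw [← hpre]
    simp only [zTerm_shift]
    rw [hpre, Nat.mul_div_cancel_left k (by norm_num : (0:Nat) < 12)]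
    simp only [altLoopB, List.length_nil, Nat.add_zero]
    have hterm : ("" ++ zTerm "111111111111".toList 0 1 ++ zTerm "111111111111".toList 2 3
        ++ zTerm "111111111111".toList 4 5 ++ zTerm "111111111111".toList 6 7
        ++ zTerm "111111111111".toList 8 9 ++ zTerm "111111111111".toList 10 11)
        = strMul (zwcB.getD 3 "") 6 := by decide
    rw [hterm]
  | cons c cs ih =>
    intro hg k pre acc hpre
    have hc := hg c (by simp)
    obtain ⟨hb12, hbchunk⟩ := perChar c.toNat (List.mem_range.mpr (by omega)) hc.1
    simp only [List.flatMap_cons, List.append_assoc]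
    have hlen : (pre ++ (charBitsA (c.toNat : Int) ++
        ((cs.flatMap (fun c => charBitsA (c.toNat : Int))) ++ "111111111111".toList))).length
        = 12 * k + 12 + (cs.flatMap (fun c => charBitsA (c.toNat : Int))).length + 12 := by
      simp [hpre, hb12]; omega
    unfold outerLoopA
    rw [dif_pos (by rw [hlen]; omega)]
    rw [innerLoopA_eq _ _ (by rw [hlen]; omega)]
    rw [← hpre]
    simp only [zTerm_shift]
    rw [zTerm_left _ _ _ _ (by omega) (by omega), zTerm_left _ _ _ _ (by omega) (by omega),
        zTerm_left _ _ _ _ (by omega) (by omega), zTerm_left _ _ _ _ (by omega) (by omega),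
        zTerm_left _ _ _ _ (by omega) (by omega), zTerm_left _ _ _ _ (by omega) (by omega)]
    have hch : ("" ++ zTerm (charBitsA (c.toNat : Int)) 0 1 ++ zTerm (charBitsA (c.toNat : Int)) 2 3
        ++ zTerm (charBitsA (c.toNat : Int)) 4 5 ++ zTerm (charBitsA (c.toNat : Int)) 6 7
        ++ zTerm (charBitsA (c.toNat : Int)) 8 9 ++ zTerm (charBitsA (c.toNat : Int)) 10 11)
        = chunkStr (charBitsA (c.toNat : Int)) := rfl
    rw [hch, hbchunk, hpre, Nat.mul_div_cancel_left k (by norm_num : (0:Nat) < 12)]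
    rw [← List.append_assoc pre (charBitsA (c.toNat : Int)) _]
    rw [show 12 * k + 12 = 12 * (k + 1) from by ring]
    rw [ih (fun x hx => hg x (by simp [hx])) (k + 1) _ _ (by simp [hpre, hb12]; ring)]
    simp only [altLoopB, List.length_cons]
    rw [show k + 1 + cs.length = k + (cs.length + 1) from by omega]

lemma tailLoopA_eq : ∀ (n t : Nat), coverText.length - t ≤ n → ∀ (acc : List String),
    tailLoopA t acc = acc ++ coverText.drop t := by
  intro n
  induction n with
  | zero =>
    intro t ht acc
    unfold tailLoopA
    rw [dif_neg (by omega), List.drop_eq_nil_of_le (by omega), List.append_nil]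
  | succ n ih =>
    intro t ht acc
    by_cases h : t < coverText.length
    · unfold tailLoopA
      rw [dif_pos h, ih (t + 1) (by omega), List.getD_eq_getElem _ _ h,
          List.drop_eq_getElem_cons h]
      simp
    · unfold tailLoopA
      rw [dif_neg h, List.drop_eq_nil_of_le (by omega), List.append_nil]

-- ===== VERDICT (by name: the statement is the Claim_ definition above) =====
theorem encode_txt_data_spec : Claim_equal_encode_txt_data := by
  intro text hDom hPre
  have hg : ∀ c ∈ text.toList, 32 ≤ c.toNat ∧ c.toNat ≤ 126 := by
    intro c hc
    have hd : pvDomChar c = true := by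
      have := hDom
      unfold Dom_encode_txt_data pvDomStr at this
      exact (List.all_eq_true.mp this) c hc
    have hp : 32 ≤ c.toNat := by
      have := hPre.1
      simp only [List.all_eq_true, decide_eq_true_eq] at this
      exact this c hc
    unfold pvDomChar at hd
    simp only [Bool.or_eq_true, Bool.and_eq_true, decide_eq_true_eq, beq_iff_eq] at hd
    omega
  unfold Spec_encode_txt_data encode_txt_data encode_txt_data_alt
  dsimp only
  rw [PySem.List.foldl_append_eq_flatMap, List.nil_append]
  have hfl := bits_length text.toList hg
  have hmain := outer_main text.toList hg 0 [] [] rfl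
  simp only [List.nil_append, Nat.mul_zero, Nat.zero_add] at hmain
  rw [hmain]
  have hlen : (text.toList.flatMap (fun c => charBitsA (c.toNat : Int))
      ++ "111111111111".toList).length = 12 * (text.toList.length + 1) := by
    simp [hfl]; ring
  rw [hlen, Nat.mul_div_cancel_left _ (by norm_num : (0:Nat) < 12)]
  rw [tailLoopA_eq coverText.length (text.toList.length + 1) (by omega)]
  rw [PySem.List.slice_from_natCast]
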